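-- pv_equiv track=rewrite | github.com/usnistgov/SDNist | sdnist/gui/pages/dashboard/metadata/__init__.py | deduce_target_dataset
-- ===== SOURCE A (Python) =====
-- from typing import Optional, Tuple, List, Dict
--
-- def deduce_target_dataset(deid_data_path: str) -> Optional[str]:
--     checks = {
--         "ma2019": {
--             "in": ['_ma_', '-ma-', 'ma2019'],
--             "starts_with": ['ma_', 'ma-'],
--             "ends_with": ['_ma', '-ma']
--         },
--         "tx2019": {
--             "in": ['_tx_', '-tx-', 'tx2019'],
--             "starts_with": ['tx_', 'tx-'],
--             "ends_with": ['_tx', '-tx']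
--         },
--         "national2019": {
--             "in": ['_na_', '-na-', 'na2019', '_national_', '-national-', 'national2019'],
--             "starts_with": ['na_', 'na-', 'national_', 'national-'],
--             "ends_with": ['_na', '-na', '_national', '-national']
--         }
--     }
--
--     for k, v in checks.items():
--         for i in v['in']:
--             if i in deid_data_path:
--                 return k
--         for i in v['starts_with']:
--             if deid_data_path.startswith(i):
--                 return k
--         for i in v['ends_with']:
--             if deid_data_path.endswith(i):
--                 return k
--     return None
-- ===== SOURCE B (Python) =====
-- def deduce_target_dataset(deid_data_path):
--     # One flat mechanism: pad the path with NUL sentinels so prefix/suffix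
--     # checks become plain substring checks on the padded string.
--     t = "\0" + deid_data_path + "\0"
--     table = [
--         ("ma2019", ("_ma_", "-ma-", "ma2019", "\0ma_", "\0ma-", "_ma\0", "-ma\0")),
--         ("tx2019", ("_tx_", "-tx-", "tx2019", "\0tx_", "\0tx-", "_tx\0", "-tx\0")),
--         ("national2019", ("_na_", "-na-", "na2019", "_national_", "-national-", "national2019",
--                           "\0na_", "\0na-", "\0national_", "\0national-",
--                           "_na\0", "-na\0", "_national\0", "-national\0")),
--     ]
--     for k, pats in table:
--         if any(s in t for s in pats):
--             return k
--     return None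
-- ===== Notes on version B (the rewrite author's own statement) =====
-- stated objective: simpler
-- what changed: B replaces A's dict of three per-category token lists with three membership mechanisms (substring / startswith / endswith) by a single flat substring scan: the path is padded with NUL sentinels and prefix/suffix tokens carry the sentinel, so one substring test per token does all three jobs.
import Mathlib
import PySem

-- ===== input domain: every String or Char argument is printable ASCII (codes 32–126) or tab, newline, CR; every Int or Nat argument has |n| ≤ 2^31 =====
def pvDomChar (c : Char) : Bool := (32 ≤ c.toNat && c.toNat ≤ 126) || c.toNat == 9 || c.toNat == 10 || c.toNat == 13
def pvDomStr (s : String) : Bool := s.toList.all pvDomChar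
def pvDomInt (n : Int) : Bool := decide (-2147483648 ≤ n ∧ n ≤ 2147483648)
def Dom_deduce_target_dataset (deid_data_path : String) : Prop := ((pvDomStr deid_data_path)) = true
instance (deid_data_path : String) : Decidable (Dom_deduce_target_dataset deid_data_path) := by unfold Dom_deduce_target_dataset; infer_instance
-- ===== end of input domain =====

-- B replaces A's three per-category membership tests by one flat substring scan over
-- a NUL-padded copy of the path (prefix/suffix tokens carry a NUL sentinel); objective: simpler.

-- ===== PORT A =====
-- the dict of dicts, flattened to (key, (in-list, starts_with-list, ends_with-list))
def dtdChecks : List (String × (List String × List String × List String)) :=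
  [ ("ma2019", (["_ma_", "-ma-", "ma2019"], ["ma_", "ma-"], ["_ma", "-ma"])),
    ("tx2019", (["_tx_", "-tx-", "tx2019"], ["tx_", "tx-"], ["_tx", "-tx"])),
    ("national2019", (["_na_", "-na-", "na2019", "_national_", "-national-", "national2019"],
        ["na_", "na-", "national_", "national-"],
        ["_na", "-na", "_national", "-national"])) ]

-- 'for k, v in checks.items(): …' with the three early-returning inner loops
def dtdLoopA (p : String) : List (String × (List String × List String × List String)) → Option String
  | [] => none
  | (k, v) :: rest =>
    if v.1.any (fun i => PySem.Str.isIn i p) then some k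
    else if v.2.1.any (fun i => PySem.Str.startswith p i) then some k
    else if v.2.2.any (fun i => PySem.Str.endswith p i) then some k
    else dtdLoopA p rest

def deduce_target_dataset (deid_data_path : String) : Option String :=
  dtdLoopA deid_data_path dtdChecks

-- ===== PORT B =====
-- t = "\0" + path + "\0" (built as List Char; exact for '+' on str)
def dtdTable : List (String × List (List Char)) :=
  [ ("ma2019", ["_ma_".toList, "-ma-".toList, "ma2019".toList,
      '\x00' :: "ma_".toList, '\x00' :: "ma-".toList, "_ma".toList ++ ['\x00'], "-ma".toList ++ ['\x00']]),
    ("tx2019", ["_tx_".toList, "-tx-".toList, "tx2019".toList,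
      '\x00' :: "tx_".toList, '\x00' :: "tx-".toList, "_tx".toList ++ ['\x00'], "-tx".toList ++ ['\x00']]),
    ("national2019", ["_na_".toList, "-na-".toList, "na2019".toList,
      "_national_".toList, "-national-".toList, "national2019".toList,
      '\x00' :: "na_".toList, '\x00' :: "na-".toList,
      '\x00' :: "national_".toList, '\x00' :: "national-".toList,
      "_na".toList ++ ['\x00'], "-na".toList ++ ['\x00'],
      "_national".toList ++ ['\x00'], "-national".toList ++ ['\x00']]) ]

def dtdLoopB (t : List Char) : List (String × List (List Char)) → Option String
  | [] => none
  | (k, pats) :: rest =>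
    if pats.any (fun s => PySem.Chars.isIn s t) then some k else dtdLoopB t rest

def deduce_target_dataset_alt (deid_data_path : String) : Option String :=
  dtdLoopB ('\x00' :: deid_data_path.toList ++ ['\x00']) dtdTable

-- ===== PRECONDITION & SPEC =====
def Spec_deduce_target_dataset (deid_data_path : String) (out : Option String) : Prop := out = deduce_target_dataset_alt deid_data_path
instance (deid_data_path : String) (out : Option String) : Decidable (Spec_deduce_target_dataset deid_data_path out) := by unfold Spec_deduce_target_dataset; infer_instance

-- ===== CLAIM (what is proved, stated in full; the proofs are below) =====
def Claim_equal_deduce_target_dataset : Prop := ∀ (deid_data_path : String), Dom_deduce_target_dataset deid_data_path → Spec_deduce_target_dataset deid_data_path (deduce_target_dataset deid_data_path)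

-- ===== LEMMAS AND PROOFS =====

-- splitting an append at the unique NUL of the right-hand side
lemma dtd_split {c : Char} {a s l t : List Char} (ha : c ∉ a) (hl : c ∉ l)
    (h : a ++ c :: s = l ++ c :: t) : a = l ∧ s = t := by
  induction a generalizing l with
  | nil =>
    cases l with
    | nil => simpa using h
    | cons d l' =>
      simp at h
      exact absurd (h.1 ▸ List.mem_cons_self) hl
  | cons x a' ih =>
    cases l with
    | nil =>
      simp at h
      exact absurd (h.1 ▸ List.mem_cons_self) ha
    | cons d l' =>
      simp at h ha hl
      obtain ⟨hx, h2⟩ := h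
      obtain ⟨h3, h4⟩ := ih ha.2 hl.2 h2
      exact ⟨by simp [hx, h3], h4⟩

lemma dtd_pad_prefix {c : Char} {s l : List Char} (hs : s ≠ []) (hcs : c ∉ s) (hl : c ∉ l) :
    (c :: s) <:+: (c :: l ++ [c]) ↔ s <+: l := by
  constructor
  · rintro ⟨a, b, hab⟩
    cases a with
    | nil =>
      simp only [List.nil_append, List.cons_append] at hab
      obtain ⟨-, hab⟩ := List.cons_eq_cons.mp hab
      -- s ++ b = l ++ [c]
      have hsl : s <+: l ++ [c] := ⟨b, hab⟩
      have hlen : s.length + b.length = l.length + 1 := by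
        have := congrArg List.length hab; simpa using this
      rcases Nat.lt_or_ge l.length s.length with hgt | hle
      · have hb : b = [] := List.length_eq_zero_iff.mp (by omega)
        subst hb
        simp at hab
        exact absurd (hab ▸ (List.mem_append_right l List.mem_cons_self)) hcs
      · exact List.prefix_of_prefix_length_le hsl (List.prefix_append l [c]) hle
    | cons x a' =>
      simp only [List.cons_append, List.append_assoc] at hab
      obtain ⟨-, hab⟩ := List.cons_eq_cons.mp hab
      -- hab : a' ++ (c :: s) ++ b = l ++ [c]  (assoc'd)
      have hab' : a' ++ c :: (s ++ b) = l ++ c :: [] := by simpa using hab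
      have hlenb : a'.length + (s.length + b.length + 1) = l.length + 1 := by
        have := congrArg List.length hab'; simpa using this
      have hslen : 1 ≤ s.length := by
        cases s with
        | nil => exact absurd rfl hs
        | cons _ _ => simp
      have hale : a'.length ≤ l.length := by omega
      have hpre : a' <+: l := by
        refine List.prefix_of_prefix_length_le ⟨c :: (s ++ b), hab'⟩ ?_ hale
        exact ⟨c :: [], by simp⟩
      have hca' : c ∉ a' := fun hc => hl (hpre.subset hc)
      obtain ⟨-, h2⟩ := dtd_split hca' hl hab'
      exact absurd (List.append_eq_nil_iff.mp h2).1 hs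
  · rintro ⟨t, ht⟩
    exact ⟨[], t ++ [c], by simp [← ht]⟩

lemma dtd_pad_infix {c : Char} {s l : List Char} (hs : s ≠ []) (hcs : c ∉ s) (hl : c ∉ l) :
    s <:+: (c :: l ++ [c]) ↔ s <:+: l := by
  constructor
  · rintro ⟨a, b, hab⟩
    cases a with
    | nil =>
      cases s with
      | nil => exact absurd rfl hs
      | cons x s' =>
        simp only [List.nil_append, List.cons_append] at hab
        obtain ⟨hx, -⟩ := List.cons_eq_cons.mp hab
        exact absurd (hx ▸ List.mem_cons_self) hcs
    | cons x a' =>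
      simp only [List.cons_append, List.append_assoc] at hab
      obtain ⟨-, hab⟩ := List.cons_eq_cons.mp hab
      -- hab : a' ++ (s ++ b) = l ++ [c]
      rcases List.eq_nil_or_concat b with hb | ⟨b', y, hb⟩
      · subst hb
        rcases List.eq_nil_or_concat s with hs' | ⟨s', z, hs'⟩
        · exact absurd hs' hs
        · subst hs'
          have hL : (a' ++ s') ++ [z] = l ++ [c] := by simpa [List.append_assoc] using hab
          obtain ⟨-, hz⟩ := List.append_inj' hL rfl
          have hz' : z = c := by simpa using hz
          have hmem : c ∈ s'.concat z := by rw [hz']; simp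
          exact (hcs hmem).elim
      · subst hb
        have hL : (a' ++ (s ++ b')) ++ [y] = l ++ [c] := by simpa [List.append_assoc] using hab
        obtain ⟨h1, -⟩ := List.append_inj' hL rfl
        exact ⟨a', b', by simpa [List.append_assoc] using h1⟩
  · rintro ⟨a, b, hab⟩
    exact ⟨c :: a, b ++ [c], by simp [← hab]⟩

lemma dtd_pad_suffix {c : Char} {s l : List Char} (hs : s ≠ []) (hcs : c ∉ s) (hl : c ∉ l) :
    (s ++ [c]) <:+: (c :: l ++ [c]) ↔ s <:+ l := by
  rw [← List.reverse_infix, ← List.reverse_prefix]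
  have h1 : (s ++ [c]).reverse = c :: s.reverse := by simp
  have h2 : (c :: l ++ [c]).reverse = c :: l.reverse ++ [c] := by simp
  rw [h1, h2]
  exact dtd_pad_prefix (by simpa using hs) (by simpa using hcs) (by simpa using hl)

-- token-level bridges (Bool equalities), for NUL-free nonempty tokens and NUL-free path
lemma dtd_tok_in (s p : String) (hs : s.toList ≠ []) (hcs : '\x00' ∉ s.toList)
    (hl : '\x00' ∉ p.toList) :
    PySem.Chars.isIn s.toList ('\x00' :: p.toList ++ ['\x00']) = PySem.Str.isIn s p := by
  rw [Bool.eq_iff_iff, PySem.Chars.isIn_iff_infix, PySem.Str.isIn_iff_infix]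
  exact dtd_pad_infix hs hcs hl

lemma dtd_tok_sw (s p : String) (hs : s.toList ≠ []) (hcs : '\x00' ∉ s.toList)
    (hl : '\x00' ∉ p.toList) :
    PySem.Chars.isIn ('\x00' :: s.toList) ('\x00' :: p.toList ++ ['\x00']) = PySem.Str.startswith p s := by
  rw [Bool.eq_iff_iff, PySem.Chars.isIn_iff_infix, PySem.Str.startswith_eq,
    PySem.Chars.startswith_iff]
  exact dtd_pad_prefix hs hcs hl

lemma dtd_tok_ew (s p : String) (hs : s.toList ≠ []) (hcs : '\x00' ∉ s.toList)
    (hl : '\x00' ∉ p.toList) :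
    PySem.Chars.isIn (s.toList ++ ['\x00']) ('\x00' :: p.toList ++ ['\x00']) = PySem.Str.endswith p s := by
  rw [Bool.eq_iff_iff, PySem.Chars.isIn_iff_infix, PySem.Str.endswith_eq,
    PySem.Chars.endswith_iff]
  exact dtd_pad_suffix hs hcs hl

lemma dtd_ite_or {α : Type} (a b : Bool) (x y : α) :
    (if (a || b) = true then x else y) = if a = true then x else if b = true then x else y := by
  cases a <;> simp

lemma dtd_nul_free {p : String} (h : Dom_deduce_target_dataset p) : '\x00' ∉ p.toList := by
  intro hmem
  unfold Dom_deduce_target_dataset pvDomStr at h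
  have := List.all_eq_true.mp h _ hmem
  simp [pvDomChar] at this

-- ===== VERDICT (by name: the statement is the Claim_ definition above) =====
theorem deduce_target_dataset_spec : Claim_equal_deduce_target_dataset := by
  intro p hdom
  have hl : '\x00' ∉ p.toList := dtd_nul_free hdom
  unfold Spec_deduce_target_dataset deduce_target_dataset deduce_target_dataset_alt
  simp only [dtdChecks, dtdTable, dtdLoopA, dtdLoopB, List.any_cons, List.any_nil,
    Bool.or_false]
  rw [dtd_tok_in _ p (by decide) (by decide) hl, dtd_tok_in _ p (by decide) (by decide) hl,
      dtd_tok_in _ p (by decide) (by decide) hl, dtd_tok_sw _ p (by decide) (by decide) hl,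
      dtd_tok_sw _ p (by decide) (by decide) hl, dtd_tok_ew _ p (by decide) (by decide) hl,
      dtd_tok_ew _ p (by decide) (by decide) hl,
      dtd_tok_in _ p (by decide) (by decide) hl, dtd_tok_in _ p (by decide) (by decide) hl,
      dtd_tok_in _ p (by decide) (by decide) hl, dtd_tok_sw _ p (by decide) (by decide) hl,
      dtd_tok_sw _ p (by decide) (by decide) hl, dtd_tok_ew _ p (by decide) (by decide) hl,
      dtd_tok_ew _ p (by decide) (by decide) hl,
      dtd_tok_in _ p (by decide) (by decide) hl, dtd_tok_in _ p (by decide) (by decide) hl,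
      dtd_tok_in _ p (by decide) (by decide) hl, dtd_tok_in _ p (by decide) (by decide) hl,
      dtd_tok_in _ p (by decide) (by decide) hl, dtd_tok_in _ p (by decide) (by decide) hl,
      dtd_tok_sw _ p (by decide) (by decide) hl, dtd_tok_sw _ p (by decide) (by decide) hl,
      dtd_tok_sw _ p (by decide) (by decide) hl, dtd_tok_sw _ p (by decide) (by decide) hl,
      dtd_tok_ew _ p (by decide) (by decide) hl, dtd_tok_ew _ p (by decide) (by decide) hl,
      dtd_tok_ew _ p (by decide) (by decide) hl, dtd_tok_ew _ p (by decide) (by decide) hl]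
  simp only [dtd_ite_or]
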